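-- pv_equiv track=rewrite | github.com/ramalMr/ders-uni | Untitled-1.py | en_boyuk_elementi_tap
-- ===== SOURCE A (Python) =====
-- def en_boyuk_elementi_tap(matrix):
--     en_boyuk = matrix[0][0]
--     en_boyuk_setir = 0
--     en_boyuk_sutun = 0
--
--     for i in range(len(matrix)):
--         for j in range(len(matrix[i])):
--             if matrix[i][j] > en_boyuk:
--                 en_boyuk = matrix[i][j]
--                 en_boyuk_setir = i
--                 en_boyuk_sutun = j
--
--     return en_boyuk, en_boyuk_setir, en_boyuk_sutun
-- ===== SOURCE B (Python) =====
-- def en_boyuk_elementi_tap(matrix):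
--     # pass 1: find the maximum value, seeded at matrix[0][0]
--     en_boyuk = matrix[0][0]
--     for row in matrix:
--         for x in row:
--             if x > en_boyuk:
--                 en_boyuk = x
--     # pass 2: locate its first occurrence in row-major order
--     for i, row in enumerate(matrix):
--         for j, x in enumerate(row):
--             if x == en_boyuk:
--                 return en_boyuk, i, j
-- ===== Notes on version B (the rewrite author's own statement) =====
-- stated objective: alternative
-- what changed: A tracks the running maximum and its indices in one index-driven pass; B first computes the maximum with a value-only pass over the rows and then does a second row-major pass returning the first position equal to that maximum (find-then-locate).
import Mathlib
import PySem

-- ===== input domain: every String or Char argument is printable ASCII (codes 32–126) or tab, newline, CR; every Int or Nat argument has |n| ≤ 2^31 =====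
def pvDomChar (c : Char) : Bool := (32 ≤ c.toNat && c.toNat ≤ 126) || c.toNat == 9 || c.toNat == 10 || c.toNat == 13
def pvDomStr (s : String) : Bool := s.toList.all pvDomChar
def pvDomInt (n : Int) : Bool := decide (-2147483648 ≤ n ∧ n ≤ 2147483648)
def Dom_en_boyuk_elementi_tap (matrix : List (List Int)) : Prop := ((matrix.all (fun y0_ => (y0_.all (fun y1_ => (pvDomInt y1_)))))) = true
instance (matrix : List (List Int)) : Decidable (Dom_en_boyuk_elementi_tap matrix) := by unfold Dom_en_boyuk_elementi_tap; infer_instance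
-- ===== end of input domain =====

-- B differs from A by decomposition: a value-only max pass, then a second pass locating its first occurrence.

-- ===== PORT A =====
def en_boyuk_elementi_tap (matrix : List (List Int)) : Int × Int × Int :=
  -- en_boyuk = matrix[0][0] (total form pyGetD; Pre_ guarantees the index is in range)
  let en0 : Int := PySem.List.pyGetD (PySem.List.pyGetD matrix 0 []) 0 0
  (PySem.List.pyRange 0 (matrix.length : Int) 1).foldl
    (fun s i =>
      let row := PySem.List.pyGetD matrix i []
      (PySem.List.pyRange 0 (row.length : Int) 1).foldl
        (fun s j =>
          let v := PySem.List.pyGetD row j 0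
          if v > s.1 then (v, i, j) else s)
        s)
    (en0, 0, 0)

-- ===== PORT B =====
-- pass 1: running maximum over a row / over all rows
def pvRowMax (m : Int) (row : List Int) : Int :=
  row.foldl (fun m x => if x > m then x else m) m

def pvMatMax (m : Int) (rows : List (List Int)) : Int :=
  rows.foldl pvRowMax m

-- pass 2: first position equal to m (enumerate-style search)
def pvFindCol (m : Int) (j : Int) : List Int → Option Int
  | [] => none
  | x :: xs => if x = m then some j else pvFindCol m (j + 1) xs

def pvFindRow (m : Int) (i : Int) : List (List Int) → Option (Int × Int)
  | [] => none
  | r :: rs =>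
    match pvFindCol m 0 r with
    | some j => some (i, j)
    | none => pvFindRow m (i + 1) rs

-- wrap pass 2's result (the no-occurrence branch is unreachable: the maximum occurs in the matrix)
def pvLocate (m : Int) (matrix : List (List Int)) : Int × Int × Int :=
  match pvFindRow m 0 matrix with
  | some (i, j) => (m, i, j)
  | none => (m, 0, 0)

def en_boyuk_elementi_tap_alt (matrix : List (List Int)) : Int × Int × Int :=
  pvLocate (pvMatMax (PySem.List.pyGetD (PySem.List.pyGetD matrix 0 []) 0 0) matrix) matrix

-- ===== PRECONDITION & SPEC =====
-- Pre_ excludes exactly the inputs where Python A raises IndexError on the seed matrix[0][0]: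
-- the empty matrix and matrices whose first row is empty.
def Pre_en_boyuk_elementi_tap (matrix : List (List Int)) : Prop :=
  matrix ≠ [] ∧ matrix.headD [] ≠ []
instance (matrix : List (List Int)) : Decidable (Pre_en_boyuk_elementi_tap matrix) := by unfold Pre_en_boyuk_elementi_tap; infer_instance

def pvWitness_en_boyuk_elementi_tap : List (List Int) := [[1, 2], [3, 0]]

def Spec_en_boyuk_elementi_tap (matrix : List (List Int)) (out : Int × Int × Int) : Prop := out = en_boyuk_elementi_tap_alt matrix
instance (matrix : List (List Int)) (out : Int × Int × Int) : Decidable (Spec_en_boyuk_elementi_tap matrix out) := by unfold Spec_en_boyuk_elementi_tap; infer_instance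

-- ===== CLAIM (what is proved, stated in full; the proofs are below) =====
def Claim_equal_en_boyuk_elementi_tap : Prop := ∀ (matrix : List (List Int)), Dom_en_boyuk_elementi_tap matrix → Pre_en_boyuk_elementi_tap matrix → Spec_en_boyuk_elementi_tap matrix (en_boyuk_elementi_tap matrix)

-- ===== LEMMAS AND PROOFS =====

-- Structural mirror of A's two nested index loops
def pvInnerA (i : Int) (s : Int × Int × Int) : Int → List Int → Int × Int × Int
  | _, [] => s
  | j, x :: xs => pvInnerA i (if x > s.1 then (x, i, j) else s) (j + 1) xs

def pvOuterA (s : Int × Int × Int) : Int → List (List Int) → Int × Int × Int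
  | _, [] => s
  | i, r :: rs => pvOuterA (pvInnerA i s 0 r) (i + 1) rs

-- basic facts about the running maximum
theorem pvRowMax_cons (m x : Int) (xs : List Int) :
    pvRowMax m (x :: xs) = pvRowMax (if x > m then x else m) xs := rfl

theorem pvMatMax_cons (m : Int) (r : List Int) (rs : List (List Int)) :
    pvMatMax m (r :: rs) = pvMatMax (pvRowMax m r) rs := rfl

theorem pvRowMax_ge : ∀ (row : List Int) (m : Int), m ≤ pvRowMax m row := by
  intro row
  induction row with
  | nil => intro m; simp [pvRowMax]
  | cons x xs ih =>
    intro m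
    rw [pvRowMax_cons]
    have h := ih (if x > m then x else m)
    by_cases hx : x > m
    · rw [if_pos hx] at h ⊢; omega
    · rw [if_neg hx] at h ⊢; omega

theorem pvRowMax_mem_le : ∀ (row : List Int) (m x : Int), x ∈ row → x ≤ pvRowMax m row := by
  intro row
  induction row with
  | nil => intro m x h; simp at h
  | cons y ys ih =>
    intro m x h
    rw [pvRowMax_cons]
    rcases List.mem_cons.mp h with h | h
    · subst h
      have h2 := pvRowMax_ge ys (if x > m then x else m)
      by_cases hx : x > m
      · rw [if_pos hx] at h2 ⊢; omega
      · rw [if_neg hx] at h2 ⊢; omega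
    · exact ih _ x h

theorem pvRowMax_eq_or_mem : ∀ (row : List Int) (m : Int),
    pvRowMax m row = m ∨ pvRowMax m row ∈ row := by
  intro row
  induction row with
  | nil => intro m; left; simp [pvRowMax]
  | cons x xs ih =>
    intro m
    rw [pvRowMax_cons]
    rcases ih (if x > m then x else m) with h | h
    · rw [h]
      by_cases hx : x > m
      · right; rw [if_pos hx]; simp
      · left; rw [if_neg hx]
    · right; exact List.mem_cons_of_mem _ h

theorem pvMatMax_ge : ∀ (rows : List (List Int)) (m : Int), m ≤ pvMatMax m rows := by
  intro rows
  induction rows with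
  | nil => intro m; simp [pvMatMax]
  | cons r rs ih =>
    intro m
    rw [pvMatMax_cons]
    exact le_trans (pvRowMax_ge r m) (ih (pvRowMax m r))

theorem pvMatMax_eq_or_mem : ∀ (rows : List (List Int)) (m : Int),
    pvMatMax m rows = m ∨ ∃ r ∈ rows, pvMatMax m rows ∈ r := by
  intro rows
  induction rows with
  | nil => intro m; left; simp [pvMatMax]
  | cons r rs ih =>
    intro m
    rw [pvMatMax_cons]
    rcases ih (pvRowMax m r) with h | ⟨r', hr', hm⟩
    · rw [h]
      rcases pvRowMax_eq_or_mem r m with h2 | h2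
      · left; exact h2
      · right; exact ⟨r, by simp, h2⟩
    · right; exact ⟨r', List.mem_cons_of_mem _ hr', hm⟩

theorem pvFindCol_none : ∀ (row : List Int) (m j : Int),
    (∀ x ∈ row, x ≠ m) → pvFindCol m j row = none := by
  intro row
  induction row with
  | nil => intro m j _; rfl
  | cons x xs ih =>
    intro m j h
    simp only [pvFindCol]
    rw [if_neg (h x (by simp))]
    exact ih m (j + 1) (fun x hx => h x (List.mem_cons_of_mem _ hx))

theorem pvFindCol_isSome : ∀ (row : List Int) (m j : Int),
    m ∈ row → (pvFindCol m j row).isSome := by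
  intro row
  induction row with
  | nil => intro m j h; simp at h
  | cons x xs ih =>
    intro m j h
    simp only [pvFindCol]
    by_cases hx : x = m
    · rw [if_pos hx]; rfl
    · rw [if_neg hx]
      rcases List.mem_cons.mp h with h | h
      · exact absurd h.symm hx
      · exact ih m (j + 1) h

theorem pvFindRow_isSome : ∀ (rows : List (List Int)) (m i : Int),
    (∃ r ∈ rows, m ∈ r) → (pvFindRow m i rows).isSome := by
  intro rows
  induction rows with
  | nil => intro m i h; simp at h
  | cons r rs ih =>
    intro m i h
    simp only [pvFindRow]
    by_cases hr : m ∈ r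
    · rcases Option.isSome_iff_exists.mp (pvFindCol_isSome r m 0 hr) with ⟨j, hj⟩
      rw [hj]
      rfl
    · rcases h with ⟨r', hr', hm⟩
      rcases List.mem_cons.mp hr' with h' | h'
      · exact absurd (h' ▸ hm) hr
      · rw [pvFindCol_none r m 0 (fun x hx hxm => hr (hxm ▸ hx))]
        exact ih m (i + 1) ⟨r', h', hm⟩

-- characterization of A's inner loop: max of row, located at its first occurrence
theorem pvInnerA_char : ∀ (row : List Int) (m pi pj i j : Int),
    pvInnerA i (m, pi, pj) j row =
      if pvRowMax m row = m then (m, pi, pj)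
      else (pvRowMax m row, i, (pvFindCol (pvRowMax m row) j row).getD 0) := by
  intro row
  induction row with
  | nil => intro m pi pj i j; simp [pvInnerA, pvRowMax]
  | cons x xs ih =>
    intro m pi pj i j
    rw [pvRowMax_cons]
    by_cases hx : x > m
    · have hstep : pvInnerA i (m, pi, pj) j (x :: xs) = pvInnerA i (x, i, j) (j + 1) xs := by
        simp [pvInnerA, hx]
      rw [hstep, if_pos hx, ih x i j i (j + 1)]
      have hge : x ≤ pvRowMax x xs := pvRowMax_ge xs x
      by_cases hM : pvRowMax x xs = x
      · have hne : pvRowMax x xs ≠ m := by omega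
        rw [if_pos hM, if_neg hne, hM]
        simp [pvFindCol]
      · have hne : pvRowMax x xs ≠ m := by omega
        have hxm : ¬ (x = pvRowMax x xs) := by omega
        rw [if_neg hM, if_neg hne]
        simp only [pvFindCol]
        rw [if_neg hxm]
    · have hstep : pvInnerA i (m, pi, pj) j (x :: xs) = pvInnerA i (m, pi, pj) (j + 1) xs := by
        simp [pvInnerA, hx]
      rw [hstep, if_neg hx, ih m pi pj i (j + 1)]
      by_cases hM : pvRowMax m xs = m
      · rw [if_pos hM, if_pos hM]
      · have hge : m ≤ pvRowMax m xs := pvRowMax_ge xs m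
        have hxm : ¬ (x = pvRowMax m xs) := by omega
        rw [if_neg hM, if_neg hM]
        simp only [pvFindCol]
        rw [if_neg hxm]

-- characterization of A's outer loop
theorem pvOuterA_char : ∀ (rows : List (List Int)) (m pi pj i : Int),
    pvOuterA (m, pi, pj) i rows =
      if pvMatMax m rows = m then (m, pi, pj)
      else (pvMatMax m rows, ((pvFindRow (pvMatMax m rows) i rows).getD (0, 0)).1,
            ((pvFindRow (pvMatMax m rows) i rows).getD (0, 0)).2) := by
  intro rows
  induction rows with
  | nil => intro m pi pj i; simp [pvOuterA, pvMatMax]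
  | cons r rs ih =>
    intro m pi pj i
    have h0 : pvOuterA (m, pi, pj) i (r :: rs) = pvOuterA (pvInnerA i (m, pi, pj) 0 r) (i + 1) rs := rfl
    rw [h0, pvMatMax_cons, pvInnerA_char r m pi pj i 0]
    by_cases h1 : pvRowMax m r = m
    · rw [if_pos h1, h1, ih m pi pj (i + 1)]
      by_cases hM : pvMatMax m rs = m
      · rw [if_pos hM, if_pos hM]
      · rw [if_neg hM, if_neg hM]
        have hcol : pvFindCol (pvMatMax m rs) 0 r = none := by
          apply pvFindCol_none
          intro x hx hxm
          have h2 := pvRowMax_mem_le r m x hx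
          have h3 := pvMatMax_ge rs m
          omega
        simp only [pvFindRow]
        rw [hcol]
    · rw [if_neg h1, ih (pvRowMax m r) i ((pvFindCol (pvRowMax m r) 0 r).getD 0) (i + 1)]
      have hge1 := pvRowMax_ge r m
      have hge2 := pvMatMax_ge rs (pvRowMax m r)
      have hMm : pvMatMax (pvRowMax m r) rs ≠ m := by omega
      rw [if_neg hMm]
      by_cases hM : pvMatMax (pvRowMax m r) rs = pvRowMax m r
      · rw [if_pos hM, hM]
        have hmem : pvRowMax m r ∈ r := (pvRowMax_eq_or_mem r m).resolve_left h1
        rcases Option.isSome_iff_exists.mp (pvFindCol_isSome r (pvRowMax m r) 0 hmem) with ⟨j, hj⟩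
        simp only [pvFindRow]
        rw [hj]
        simp
      · rw [if_neg hM]
        have hcol : pvFindCol (pvMatMax (pvRowMax m r) rs) 0 r = none := by
          apply pvFindCol_none
          intro x hx hxm
          have h2 := pvRowMax_mem_le r m x hx
          omega
        simp only [pvFindRow]
        rw [hcol]

-- bridge: A's index-loop folds equal the structural mirrors
theorem pvInnerA_enum : ∀ (row : List Int) (j : Int) (s : Int × Int × Int) (i : Int),
    (PySem.List.enumerate row j).foldl
      (fun s p => if p.2 > s.1 then (p.2, i, p.1) else s) s = pvInnerA i s j row := by
  intro row
  induction row with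
  | nil => intro j s i; simp [PySem.List.enumerate_nil, pvInnerA]
  | cons x xs ih =>
    intro j s i
    rw [PySem.List.enumerate_cons, List.foldl_cons, pvInnerA, ih]

theorem pvInnerA_bridge (row : List Int) (s : Int × Int × Int) (i : Int) :
    (PySem.List.pyRange 0 (row.length : Int) 1).foldl
      (fun s j => if PySem.List.pyGetD row j 0 > s.1 then (PySem.List.pyGetD row j 0, i, j) else s) s
      = pvInnerA i s 0 row := by
  have h := PySem.List.enumerate_eq_map_pyRange (xs := row) (d := 0)
  rw [← pvInnerA_enum row 0 s i, h, List.foldl_map]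
  rfl

theorem pvOuterA_enum : ∀ (rows : List (List Int)) (i : Int) (s : Int × Int × Int),
    (PySem.List.enumerate rows i).foldl
      (fun s p => (PySem.List.pyRange 0 (p.2.length : Int) 1).foldl
        (fun s j => if PySem.List.pyGetD p.2 j 0 > s.1 then (PySem.List.pyGetD p.2 j 0, p.1, j) else s) s) s
      = pvOuterA s i rows := by
  intro rows
  induction rows with
  | nil => intro i s; simp [PySem.List.enumerate_nil, pvOuterA]
  | cons r rs ih =>
    intro i s
    rw [PySem.List.enumerate_cons, List.foldl_cons, pvOuterA, ← ih, pvInnerA_bridge]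

theorem portA_eq_outer (matrix : List (List Int)) :
    en_boyuk_elementi_tap matrix
      = pvOuterA (PySem.List.pyGetD (PySem.List.pyGetD matrix 0 []) 0 0, 0, 0) 0 matrix := by
  unfold en_boyuk_elementi_tap
  have h := PySem.List.enumerate_eq_map_pyRange (xs := matrix) (d := [])
  rw [← pvOuterA_enum matrix 0 _, h, List.foldl_map]
  rfl

-- ===== VERDICT (by name: the statement is the Claim_ definition above) =====
theorem en_boyuk_elementi_tap_spec : Claim_equal_en_boyuk_elementi_tap := by
  intro matrix _ hpre
  obtain ⟨hne, hrow⟩ := hpre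
  unfold Spec_en_boyuk_elementi_tap
  rcases matrix with _ | ⟨r, rs⟩
  · exact absurd rfl hne
  rcases r with _ | ⟨x, xs⟩
  · simp at hrow
  have hseed : PySem.List.pyGetD (PySem.List.pyGetD ((x :: xs) :: rs) 0 []) 0 0 = x := by
    simp [PySem.List.pyGetD_zero_cons]
  rw [portA_eq_outer]
  unfold en_boyuk_elementi_tap_alt
  rw [hseed, pvOuterA_char ((x :: xs) :: rs) x 0 0 0]
  by_cases hM : pvMatMax x ((x :: xs) :: rs) = x
  · rw [if_pos hM, hM]
    have hfr : pvFindRow x 0 ((x :: xs) :: rs) = some (0, 0) := by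
      simp [pvFindRow, pvFindCol]
    simp [pvLocate, hfr]
  · rw [if_neg hM]
    have hmem := (pvMatMax_eq_or_mem ((x :: xs) :: rs) x).resolve_left hM
    rcases Option.isSome_iff_exists.mp (pvFindRow_isSome _ _ 0 hmem) with ⟨⟨pi, pj⟩, hp⟩
    simp [pvLocate, hp]
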